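-- pv_equiv track=rewrite | github.com/JohnnyHowe/python-scripts | godot/godot_delete_redunant_import_files.py | _find_redundant_import_files_in_folder
-- ===== SOURCE A (Python) =====
-- def _find_redundant_import_files_in_folder(file_names: list):
-- 	file_names = sorted(file_names)
--
-- 	pairings = {}
-- 	for filename in file_names:
-- 		name = filename.split(".")[0]
-- 		if name not in pairings:
-- 			pairings[name] = [None, None]
--
-- 		if filename.endswith(".import"):
-- 			pairings[name][1] = filename
-- 		else:
-- 			pairings[name][0] = filename
--
-- 	for filename, import_filename in pairings.values():
-- 		if filename is None:
-- 			yield import_filename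
-- ===== SOURCE B (Python) =====
-- def _find_redundant_import_files_in_folder(file_names: list):
-- 	# Stage 1: stems that have a real (non-import) source file.
-- 	sources = {f.split(".")[0] for f in file_names if not f.endswith(".import")}
--
-- 	# Stage 2: only the orphan import files, in sorted order.
-- 	orphans = sorted(f for f in file_names
-- 	                 if f.endswith(".import") and f.split(".")[0] not in sources)
--
-- 	# Stage 3: walk the orphans backwards, keeping the first one seen per stem
-- 	# (= the sorted-last import of that stem), then undo the reversal.
-- 	kept = []
-- 	seen = set()
-- 	for f in reversed(orphans):
-- 		stem = f.split(".")[0]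
-- 		if stem not in seen:
-- 			seen.add(stem)
-- 			kept.append(f)
-- 	yield from reversed(kept)
-- ===== Notes on version B (the rewrite author's own statement) =====
-- stated objective: alternative
-- what changed: A sorts everything and builds one dict grouping every stem into a mutable [source, import] pair, then scans all pairs; B never groups: it filters the input down to orphan import files (stems with no source) in staged passes, sorts only those, and deduplicates per stem by a single backward scan with a seen-set (keeping the sorted-last import), reversing the result.
import Mathlib
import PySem

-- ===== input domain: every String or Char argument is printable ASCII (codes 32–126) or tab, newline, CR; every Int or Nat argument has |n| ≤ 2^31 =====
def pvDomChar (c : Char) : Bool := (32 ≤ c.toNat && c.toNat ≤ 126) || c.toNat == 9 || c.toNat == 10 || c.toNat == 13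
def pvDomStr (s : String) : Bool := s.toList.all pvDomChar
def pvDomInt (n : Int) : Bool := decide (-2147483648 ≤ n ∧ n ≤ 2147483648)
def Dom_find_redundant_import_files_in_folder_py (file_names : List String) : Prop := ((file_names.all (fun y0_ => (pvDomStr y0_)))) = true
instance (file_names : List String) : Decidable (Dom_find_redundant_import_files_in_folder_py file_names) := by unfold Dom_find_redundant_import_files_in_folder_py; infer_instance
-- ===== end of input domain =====

-- B replaces A's sort-everything-and-group-into-[source,import]-pairs by staged passes: filter the
-- input down to orphan import files, sort only those, and dedup per stem by one backward scan
-- (objective: alternative algorithm, same asymptotic cost).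
-- A is a generator; the ports return the list of yielded values.

-- ===== PORT A =====
-- filename.split(".")[0]  (split with "." always returns a non-empty list, so [0] never raises)
def pvPrefix (s : String) : String := ((PySem.Str.split? s ".").getD []).headD ""

-- loop body of A's first 'for': ensure key, then 'pairings[name][1] = filename' / '[0] = filename'
-- (the in-place list mutation is modelled as re-inserting the updated pair; insert keeps position)
def pvStepA (d : PySem.Dict String (Option String × Option String)) (filename : String) :
    PySem.Dict String (Option String × Option String) :=
  let name := pvPrefix filename
  let d := if d.contains name then d else d.insert name (none, none)
  if PySem.Str.endswith filename ".import" then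
    d.insert name (((d.get? name).getD (none, none)).1, some filename)
  else
    d.insert name (some filename, ((d.get? name).getD (none, none)).2)

def find_redundant_import_files_in_folder_py (file_names : List String) : List String :=
  let sortedNames := PySem.List.sorted file_names (fun x => x) false
  let pairings := sortedNames.foldl pvStepA PySem.Dict.empty
  -- 'yield import_filename' when filename is None; slot 1 is always set in that case, so the
  -- .getD "" default is never taken (Python never yields None here)
  pairings.values.foldl (fun acc p => if p.1 = none then acc ++ [p.2.getD ""] else acc) []

-- ===== PORT B =====
-- stage 1: {f.split(".")[0] for f in file_names if not f.endswith(".import")}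
def pvStemSources (file_names : List String) : PySem.Set String :=
  PySem.Set.ofList ((file_names.filter (fun f => !(PySem.Str.endswith f ".import"))).map pvPrefix)

-- stage 3's loop body: keep f unless its stem was already seen
def pvStepKeep (st : List String × PySem.Set String) (f : String) :
    List String × PySem.Set String :=
  if PySem.Set.contains st.2 (pvPrefix f) then st
  else (st.1 ++ [f], PySem.Set.add st.2 (pvPrefix f))

def find_redundant_import_files_in_folder_py_alt (file_names : List String) : List String :=
  let sources := pvStemSources file_names
  -- stage 2: sorted(f for f in file_names if f.endswith(".import") and stem not in sources)
  let orphans := PySem.List.sorted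
    (file_names.filter (fun f =>
      PySem.Str.endswith f ".import" && !(PySem.Set.contains sources (pvPrefix f))))
    (fun x => x) false
  -- stage 3: backward scan keeping the first occurrence per stem, then undo the reversal
  let st := orphans.reverse.foldl pvStepKeep ([], PySem.Set.empty)
  st.1.reverse

-- ===== PRECONDITION & SPEC =====
def Spec_find_redundant_import_files_in_folder_py (file_names : List String) (out : List String) : Prop := out = find_redundant_import_files_in_folder_py_alt file_names
instance (file_names : List String) (out : List String) : Decidable (Spec_find_redundant_import_files_in_folder_py file_names out) := by unfold Spec_find_redundant_import_files_in_folder_py; infer_instance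

-- ===== CLAIM (what is proved, stated in full; the proofs are below) =====
def Claim_equal_find_redundant_import_files_in_folder_py : Prop := ∀ (file_names : List String), Dom_find_redundant_import_files_in_folder_py file_names → Spec_find_redundant_import_files_in_folder_py file_names (find_redundant_import_files_in_folder_py file_names)

-- ===== LEMMAS AND PROOFS =====

-- ---------- Part I: A's output equals a set-plus-dict mid-form over the sorted list ----------

-- mid-form loop body: record import files per prefix, and prefixes that have a source
def pvStepB (st : PySem.Set String × PySem.Dict String String) (filename : String) :
    PySem.Set String × PySem.Dict String String :=
  let p := pvPrefix filename
  if PySem.Str.endswith filename ".import" then (st.1, st.2.insert p filename)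
  else (PySem.Set.add st.1 p, st.2)

-- "pending" entries: the (key, import-file) pairs the final loop of each form would yield
def pvG (p : String × (Option String × Option String)) : Option (String × Option String) :=
  if p.2.1 = none then some (p.1, p.2.2) else none

def pvPendA (d : PySem.Dict String (Option String × Option String)) : List (String × Option String) :=
  d.items.filterMap pvG

def pvH (S : PySem.Set String) (p : String × String) : Option (String × Option String) :=
  if PySem.Set.contains S p.1 then none else some (p.1, some p.2)

def pvPendB (S : PySem.Set String) (I : PySem.Dict String String) : List (String × Option String) :=
  I.items.filterMap (pvH S)

-- relational invariant between A's dict and the mid-form's (set, dict) state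
def pvInv (d : PySem.Dict String (Option String × Option String))
    (S : PySem.Set String) (I : PySem.Dict String String) : Prop :=
  d.keys.Nodup ∧ I.keys.Nodup ∧
  (∀ k, (∃ p, d.get? k = some p ∧ p.1.isSome) ↔ k ∈ S) ∧
  pvPendA d = pvPendB S I

-- generic facts about key-preserving filterMaps over association lists
theorem pv_filterMap_remove {V W : Type} (g : String × V → Option (String × W))
    (hg : ∀ p q, g p = some q → q.1 = p.1) (l : List (String × V)) (k : String) :
    l.filterMap (fun p => if p.1 = k then none else g p)
      = (l.filterMap g).filter (fun q => !(q.1 == k)) := by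
  induction l with
  | nil => rfl
  | cons a t ih =>
    by_cases hk : a.1 = k
    · simp [List.filterMap_cons, hk]
      cases hga : g a with
      | none => simpa using ih
      | some q =>
        have := hg a q hga
        simp [List.filter_cons, this, hk]
        simpa using ih
    · simp only [List.filterMap_cons, if_neg hk]
      cases hga : g a with
      | none => simpa using ih
      | some q =>
        have hq : q.1 ≠ k := by rw [hg a q hga]; exact hk
        simp [List.filter_cons, hq]
        simpa using ih

theorem pv_filterMap_replace {V W : Type} (g : String × V → Option (String × W))
    (hg : ∀ p q, g p = some q → q.1 = p.1) (l : List (String × V)) (k : String)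
    (r : String × W) (hsome : ∀ p ∈ l, p.1 = k → (g p).isSome) :
    l.filterMap (fun p => if p.1 = k then some r else g p)
      = (l.filterMap g).map (fun q => if q.1 = k then r else q) := by
  induction l with
  | nil => rfl
  | cons a t ih =>
    have iht := ih (fun p hp => hsome p (List.mem_cons_of_mem a hp))
    by_cases hk : a.1 = k
    · have : (g a).isSome := hsome a (List.mem_cons_self) hk
      cases hga : g a with
      | none => rw [hga] at this; simp at this
      | some q =>
        have hq := hg a q hga
        simp [List.filterMap_cons, hk, hga, hq, iht]
    · simp only [List.filterMap_cons, if_neg hk]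
      cases hga : g a with
      | none => simpa [hga] using iht
      | some q =>
        have hq : q.1 ≠ k := by rw [hg a q hga]; exact hk
        simp [hga, hq, iht]

theorem pv_key_mem_pendA (d : PySem.Dict String (Option String × Option String)) (q)
    (hq : q ∈ pvPendA d) : q.1 ∈ d.keys := by
  unfold pvPendA at hq
  rcases List.mem_filterMap.mp hq with ⟨p, hp, hg⟩
  unfold pvG at hg
  split at hg
  · cases hg; exact List.mem_map.mpr ⟨p, hp, rfl⟩
  · cases hg

theorem pv_key_mem_pendB (S : PySem.Set String) (I : PySem.Dict String String)
    (hnd : I.keys.Nodup) (k : String) :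
    (∃ w, (k, w) ∈ pvPendB S I) ↔ (k ∈ I.keys ∧ k ∉ S) := by
  constructor
  · rintro ⟨w, hw⟩
    unfold pvPendB at hw
    rcases List.mem_filterMap.mp hw with ⟨p, hp, hg⟩
    unfold pvH at hg
    split at hg
    · cases hg
    · rename_i hc
      cases hg
      refine ⟨List.mem_map.mpr ⟨p, hp, rfl⟩, ?_⟩
      intro hmem
      exact hc (by simpa [PySem.Set.contains, List.contains_iff_mem] using hmem)
  · rintro ⟨hk, hs⟩
    rcases List.mem_map.mp hk with ⟨p, hp, hp1⟩
    refine ⟨some p.2, ?_⟩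
    unfold pvPendB
    apply List.mem_filterMap.mpr
    refine ⟨p, hp, ?_⟩
    unfold pvH
    have hcf : ¬ (PySem.Set.contains S p.1 = true) := by
      rw [hp1]
      intro hct
      exact hs (by simpa [PySem.Set.contains] using hct)
    rw [if_neg hcf, hp1]

theorem pvG_key (p : String × (Option String × Option String)) (q) (h : pvG p = some q) :
    q.1 = p.1 := by
  unfold pvG at h; split at h
  · cases h; rfl
  · cases h

theorem pvH_key (S : PySem.Set String) (p : String × String) (q) (h : pvH S p = some q) :
    q.1 = p.1 := by
  unfold pvH at h; split at h
  · cases h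
  · cases h; rfl

-- small bridges
theorem pv_contains_iff (S : PySem.Set String) (k : String) :
    PySem.Set.contains S k = true ↔ k ∈ S := by
  simp [PySem.Set.contains]

theorem pv_contains_false_iff (S : PySem.Set String) (k : String) :
    PySem.Set.contains S k = false ↔ k ∉ S := by
  rw [← Bool.not_eq_true, pv_contains_iff]

theorem pv_itemsA_fresh (d : PySem.Dict String (Option String × Option String)) (k : String)
    (hc : d.contains k = false) (v : Option String × Option String) :
    ((d.insert k (none, none)).insert k v).items = d.items ++ [(k, v)] := by
  rw [PySem.Dict.insert_insert_self]
  exact PySem.Dict.items_insert_of_not_contains d v hc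

-- with Nodup keys, the item carrying key k is exactly (k, d.get? k)
theorem pv_once (d : PySem.Dict String (Option String × Option String))
    (hnd : d.keys.Nodup) (k : String) (p0 : Option String × Option String)
    (h : d.get? k = some p0) : ∀ p ∈ d.items, p.1 = k → p = (k, p0) := by
  intro p hp hpk
  have h2 : d.get? p.1 = some p.2 := PySem.Dict.get?_of_mem_items d (by simpa using hp) hnd
  rw [hpk, h] at h2
  cases h2
  exact Prod.ext hpk rfl

theorem pv_no_pend_key (d : PySem.Dict String (Option String × Option String))
    (hnd : d.keys.Nodup) (k : String) (p0 : Option String × Option String)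
    (h : d.get? k = some p0) (hfst : p0.1.isSome) : ∀ q ∈ pvPendA d, q.1 ≠ k := by
  intro q hq hqk
  rcases List.mem_filterMap.mp hq with ⟨p, hp, hg⟩
  have hpk : p.1 = k := by rw [← pvG_key p q hg, hqk]
  have := pv_once d hnd k p0 h p hp hpk
  subst this
  unfold pvG at hg
  rcases hp0 : p0.1 with _ | s
  · rw [hp0] at hfst; simp at hfst
  · simp [hp0] at hg

-- the invariant is preserved by one step
theorem pvInv_step (d : PySem.Dict String (Option String × Option String))
    (S : PySem.Set String) (I : PySem.Dict String String) (f : String)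
    (h : pvInv d S I) : pvInv (pvStepA d f) (pvStepB (S, I) f).1 (pvStepB (S, I) f).2 := by
  obtain ⟨hndA, hndI, hmem, hpend⟩ := h
  by_cases himp : PySem.Str.endswith f ".import" = true
  · -- the file is a '.import' file
    have hB : pvStepB (S, I) f = (S, I.insert (pvPrefix f) f) := by
      simp only [pvStepB]
      rw [himp]
      simp
    rw [hB]
    by_cases hc : d.contains (pvPrefix f) = true
    · obtain ⟨p0, hp0⟩ : ∃ p0, d.get? (pvPrefix f) = some p0 := by
        have h2 := PySem.Dict.contains_eq_isSome_get? d (pvPrefix f)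
        rw [hc] at h2
        exact Option.isSome_iff_exists.mp h2.symm
      have hdA : pvStepA d f = d.insert (pvPrefix f) (p0.1, some f) := by
        simp only [pvStepA]
        rw [himp, hc]
        simp [hp0]
      rw [hdA]
      refine ⟨PySem.Dict.nodup_keys_insert _ _ _ hndA, PySem.Dict.nodup_keys_insert _ _ _ hndI, ?_, ?_⟩
      · intro k'
        by_cases hkk : k' = pvPrefix f
        · subst hkk
          constructor
          · rintro ⟨p, hp, hs⟩
            rw [PySem.Dict.get?_insert_self] at hp
            cases hp
            exact (hmem (pvPrefix f)).mp ⟨p0, hp0, hs⟩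
          · intro hkS
            rcases (hmem (pvPrefix f)).mpr hkS with ⟨p, hp, hs⟩
            rw [hp0] at hp
            cases hp
            exact ⟨(p0.1, some f), PySem.Dict.get?_insert_self _ _ _, hs⟩
        · rw [PySem.Dict.get?_insert_of_ne _ _ hkk]
          exact hmem k'
      · -- pending lists stay equal
        rcases hfst : p0.1 with _ | s
        · -- the prefix had no source file yet: its pending entry is overwritten in place
          have hkS : pvPrefix f ∉ S := by
            intro hkS
            rcases (hmem (pvPrefix f)).mpr hkS with ⟨p, hp, hs⟩
            rw [hp0] at hp; cases hp; rw [hfst] at hs; simp at hs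
          have hkPend : (pvPrefix f, p0.2) ∈ pvPendA d := by
            apply List.mem_filterMap.mpr
            exact ⟨(pvPrefix f, p0), PySem.Dict.mem_items_of_get?_eq_some d hp0,
              by simp [pvG, hfst]⟩
          have hkI : pvPrefix f ∈ I.keys :=
            ((pv_key_mem_pendB S I hndI (pvPrefix f)).mp ⟨p0.2, hpend ▸ hkPend⟩).1
          have hcI : I.contains (pvPrefix f) = true :=
            (PySem.Dict.contains_iff_mem_keys I (pvPrefix f)).mpr hkI
          have hA : pvPendA (d.insert (pvPrefix f) (none, some f))
              = (pvPendA d).map (fun q => if q.1 = pvPrefix f then (pvPrefix f, some f) else q) := by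
            unfold pvPendA
            rw [PySem.Dict.items_insert_of_contains d _ hc, List.filterMap_map]
            rw [List.filterMap_congr (g := fun p =>
                if p.1 = pvPrefix f then some (pvPrefix f, some f) else pvG p)
              (by intro p hp
                  by_cases hpk : p.1 = pvPrefix f <;>
                    simp [Function.comp, hpk, pvG, hfst])]
            exact pv_filterMap_replace pvG pvG_key d.items (pvPrefix f) (pvPrefix f, some f)
              (by intro p hp hpk
                  have := pv_once d hndA (pvPrefix f) p0 hp0 p hp hpk
                  subst this
                  simp [pvG, hfst])
          have hSk : PySem.Set.contains S (pvPrefix f) = false :=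
            (pv_contains_false_iff S (pvPrefix f)).mpr hkS
          have hBp : pvPendB S (I.insert (pvPrefix f) f)
              = (pvPendB S I).map (fun q => if q.1 = pvPrefix f then (pvPrefix f, some f) else q) := by
            unfold pvPendB
            rw [PySem.Dict.items_insert_of_contains I _ hcI, List.filterMap_map]
            rw [List.filterMap_congr (g := fun p =>
                if p.1 = pvPrefix f then some (pvPrefix f, some f) else pvH S p)
              (by intro p hp
                  by_cases hpk : p.1 = pvPrefix f <;>
                    simp [Function.comp, hpk, pvH, hSk, hkS])]
            exact pv_filterMap_replace (pvH S) (pvH_key S) I.items (pvPrefix f) (pvPrefix f, some f)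
              (by intro p hp hpk
                  simp [pvH, hpk, hSk, hkS])
          show pvPendA (d.insert (pvPrefix f) (none, some f)) = pvPendB S (I.insert (pvPrefix f) f)
          rw [hA, hBp, hpend]
        · -- the prefix already has a source file: nothing pending changes
          have hkS : pvPrefix f ∈ S := (hmem (pvPrefix f)).mp ⟨p0, hp0, by simp [hfst]⟩
          have hSk : PySem.Set.contains S (pvPrefix f) = true :=
            (pv_contains_iff S (pvPrefix f)).mpr hkS
          have hA : pvPendA (d.insert (pvPrefix f) (some s, some f))
              = (pvPendA d).filter (fun q => !(q.1 == pvPrefix f)) := by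
            unfold pvPendA
            rw [PySem.Dict.items_insert_of_contains d _ hc, List.filterMap_map]
            rw [List.filterMap_congr (g := fun p =>
                if p.1 = pvPrefix f then none else pvG p)
              (by intro p hp
                  by_cases hpk : p.1 = pvPrefix f <;>
                    simp [Function.comp, hpk, pvG, hfst])]
            exact pv_filterMap_remove pvG pvG_key d.items (pvPrefix f)
          by_cases hcI : I.contains (pvPrefix f) = true
          · have hBp : pvPendB S (I.insert (pvPrefix f) f)
                = (pvPendB S I).filter (fun q => !(q.1 == pvPrefix f)) := by
              unfold pvPendB
              rw [PySem.Dict.items_insert_of_contains I _ hcI, List.filterMap_map]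
              rw [List.filterMap_congr (g := fun p =>
                  if p.1 = pvPrefix f then none else pvH S p)
                (by intro p hp
                    by_cases hpk : p.1 = pvPrefix f <;>
                      simp [Function.comp, hpk, pvH, hSk, hkS])]
              exact pv_filterMap_remove (pvH S) (pvH_key S) I.items (pvPrefix f)
            show pvPendA (d.insert (pvPrefix f) (some s, some f)) = pvPendB S (I.insert (pvPrefix f) f)
            rw [hA, hBp, hpend]
          · rw [Bool.not_eq_true] at hcI
            have hBp : pvPendB S (I.insert (pvPrefix f) f) = pvPendB S I := by
              unfold pvPendB
              rw [PySem.Dict.items_insert_of_not_contains I _ hcI, List.filterMap_append]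
              simp [pvH, hkS]
            have hid : (pvPendA d).filter (fun q => !(q.1 == pvPrefix f)) = pvPendA d := by
              apply List.filter_eq_self.mpr
              intro q hq
              simpa using pv_no_pend_key d hndA (pvPrefix f) p0 hp0 (by simp [hfst]) q hq
            show pvPendA (d.insert (pvPrefix f) (some s, some f)) = pvPendB S (I.insert (pvPrefix f) f)
            rw [hA, hid, hpend, hBp]
    · -- prefix not seen before: a fresh pending entry is appended on both sides
      rw [Bool.not_eq_true] at hc
      have hget : d.get? (pvPrefix f) = none := by
        have h2 := PySem.Dict.contains_eq_isSome_get? d (pvPrefix f)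
        rw [hc] at h2
        exact Option.not_isSome_iff_eq_none.mp (by rw [← h2]; simp)
      have hkeys : pvPrefix f ∉ d.keys :=
        (PySem.Dict.get?_eq_none_iff_not_mem_keys d (pvPrefix f)).mp hget
      have hkS : pvPrefix f ∉ S := by
        intro hkS
        rcases (hmem (pvPrefix f)).mpr hkS with ⟨p, hp, _⟩
        rw [hget] at hp; cases hp
      have hkI : pvPrefix f ∉ I.keys := by
        intro hkI
        rcases (pv_key_mem_pendB S I hndI (pvPrefix f)).mpr ⟨hkI, hkS⟩ with ⟨w, hw⟩
        rw [← hpend] at hw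
        exact hkeys (pv_key_mem_pendA d _ hw)
      have hcI : I.contains (pvPrefix f) = false := by
        rw [← Bool.not_eq_true]
        intro hcon
        exact hkI ((PySem.Dict.contains_iff_mem_keys I (pvPrefix f)).mp hcon)
      have hdA : pvStepA d f
          = (d.insert (pvPrefix f) (none, none)).insert (pvPrefix f) (none, some f) := by
        simp only [pvStepA]
        rw [himp, hc]
        simp [PySem.Dict.get?_insert_self]
      rw [hdA]
      have hnd2 : ((d.insert (pvPrefix f) (none, none)).insert (pvPrefix f)
          ((none : Option String), some f)).keys.Nodup :=
        PySem.Dict.nodup_keys_insert _ _ _ (PySem.Dict.nodup_keys_insert _ _ _ hndA)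
      refine ⟨hnd2, PySem.Dict.nodup_keys_insert _ _ _ hndI, ?_, ?_⟩
      · intro k'
        by_cases hkk : k' = pvPrefix f
        · subst hkk
          rw [PySem.Dict.insert_insert_self]
          constructor
          · rintro ⟨p, hp, hs⟩
            rw [PySem.Dict.get?_insert_self] at hp
            cases hp
            simp at hs
          · intro hs
            exact absurd hs hkS
        · rw [PySem.Dict.get?_insert_of_ne _ _ hkk, PySem.Dict.get?_insert_of_ne _ _ hkk]
          exact hmem k'
      · have hA : pvPendA ((d.insert (pvPrefix f) (none, none)).insert (pvPrefix f) (none, some f))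
            = pvPendA d ++ [(pvPrefix f, some f)] := by
          unfold pvPendA
          rw [pv_itemsA_fresh d (pvPrefix f) hc (none, some f), List.filterMap_append]
          simp [pvG]
        have hSk : PySem.Set.contains S (pvPrefix f) = false :=
          (pv_contains_false_iff S (pvPrefix f)).mpr hkS
        have hBp : pvPendB S (I.insert (pvPrefix f) f)
            = pvPendB S I ++ [(pvPrefix f, some f)] := by
          unfold pvPendB
          rw [PySem.Dict.items_insert_of_not_contains I _ hcI, List.filterMap_append]
          simp [pvH, hkS]
        show pvPendA ((d.insert (pvPrefix f) (none, none)).insert (pvPrefix f) (none, some f))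
          = pvPendB S (I.insert (pvPrefix f) f)
        rw [hA, hBp, hpend]
  · -- the file is a source file: its prefix is added to the source set,
    -- and any pending entry for that prefix disappears on both sides
    rw [Bool.not_eq_true] at himp
    have hB : pvStepB (S, I) f = (PySem.Set.add S (pvPrefix f), I) := by
      simp only [pvStepB]
      rw [himp]
      simp
    rw [hB]
    have hBp : pvPendB (PySem.Set.add S (pvPrefix f)) I
        = (pvPendB S I).filter (fun q => !(q.1 == pvPrefix f)) := by
      unfold pvPendB
      rw [List.filterMap_congr (g := fun p =>
          if p.1 = pvPrefix f then none else pvH S p)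
        (by intro p hp
            by_cases hpk : p.1 = pvPrefix f
            · simp [pvH, hpk]
            · simp [pvH, hpk])]
      exact pv_filterMap_remove (pvH S) (pvH_key S) I.items (pvPrefix f)
    by_cases hc : d.contains (pvPrefix f) = true
    · obtain ⟨p0, hp0⟩ : ∃ p0, d.get? (pvPrefix f) = some p0 := by
        have h2 := PySem.Dict.contains_eq_isSome_get? d (pvPrefix f)
        rw [hc] at h2
        exact Option.isSome_iff_exists.mp h2.symm
      have hdA : pvStepA d f = d.insert (pvPrefix f) (some f, p0.2) := by
        simp only [pvStepA]
        rw [himp, hc]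
        simp [hp0]
      rw [hdA]
      refine ⟨PySem.Dict.nodup_keys_insert _ _ _ hndA, hndI, ?_, ?_⟩
      · intro k'
        by_cases hkk : k' = pvPrefix f
        · subst hkk
          constructor
          · intro _
            rw [PySem.Set.mem_add]
            exact Or.inr rfl
          · intro _
            exact ⟨(some f, p0.2), PySem.Dict.get?_insert_self _ _ _, rfl⟩
        · rw [PySem.Dict.get?_insert_of_ne _ _ hkk, PySem.Set.mem_add]
          rw [show (k' ∈ S ∨ k' = pvPrefix f) ↔ k' ∈ S from by
            constructor
            · rintro (hs | heq)
              · exact hs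
              · exact absurd heq hkk
            · exact Or.inl]
          exact hmem k'
      · have hA : pvPendA (d.insert (pvPrefix f) (some f, p0.2))
            = (pvPendA d).filter (fun q => !(q.1 == pvPrefix f)) := by
          unfold pvPendA
          rw [PySem.Dict.items_insert_of_contains d _ hc, List.filterMap_map]
          rw [List.filterMap_congr (g := fun p =>
              if p.1 = pvPrefix f then none else pvG p)
            (by intro p hp
                by_cases hpk : p.1 = pvPrefix f <;>
                  simp [Function.comp, hpk, pvG])]
          exact pv_filterMap_remove pvG pvG_key d.items (pvPrefix f)
        show pvPendA (d.insert (pvPrefix f) (some f, p0.2)) = pvPendB (PySem.Set.add S (pvPrefix f)) I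
        rw [hA, hBp, hpend]
    · rw [Bool.not_eq_true] at hc
      have hget : d.get? (pvPrefix f) = none := by
        have h2 := PySem.Dict.contains_eq_isSome_get? d (pvPrefix f)
        rw [hc] at h2
        exact Option.not_isSome_iff_eq_none.mp (by rw [← h2]; simp)
      have hkeys : pvPrefix f ∉ d.keys :=
        (PySem.Dict.get?_eq_none_iff_not_mem_keys d (pvPrefix f)).mp hget
      have hdA : pvStepA d f
          = (d.insert (pvPrefix f) (none, none)).insert (pvPrefix f) (some f, none) := by
        simp only [pvStepA]
        rw [himp, hc]
        simp [PySem.Dict.get?_insert_self]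
      rw [hdA]
      have hnd2 : ((d.insert (pvPrefix f) (none, none)).insert (pvPrefix f)
          (some f, (none : Option String))).keys.Nodup :=
        PySem.Dict.nodup_keys_insert _ _ _ (PySem.Dict.nodup_keys_insert _ _ _ hndA)
      refine ⟨hnd2, hndI, ?_, ?_⟩
      · intro k'
        by_cases hkk : k' = pvPrefix f
        · subst hkk
          rw [PySem.Dict.insert_insert_self]
          constructor
          · intro _
            rw [PySem.Set.mem_add]
            exact Or.inr rfl
          · intro _
            exact ⟨(some f, none), PySem.Dict.get?_insert_self _ _ _, rfl⟩
        · rw [PySem.Dict.get?_insert_of_ne _ _ hkk, PySem.Dict.get?_insert_of_ne _ _ hkk,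
            PySem.Set.mem_add]
          rw [show (k' ∈ S ∨ k' = pvPrefix f) ↔ k' ∈ S from by
            constructor
            · rintro (hs | heq)
              · exact hs
              · exact absurd heq hkk
            · exact Or.inl]
          exact hmem k'
      · have hA : pvPendA ((d.insert (pvPrefix f) (none, none)).insert (pvPrefix f) (some f, none))
            = pvPendA d := by
          unfold pvPendA
          rw [pv_itemsA_fresh d (pvPrefix f) hc (some f, none), List.filterMap_append]
          simp [pvG]
        have hid : (pvPendA d).filter (fun q => !(q.1 == pvPrefix f)) = pvPendA d := by
          apply List.filter_eq_self.mpr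
          intro q hq
          have hqd := pv_key_mem_pendA d q hq
          have hne : q.1 ≠ pvPrefix f := fun hqk => hkeys (hqk ▸ hqd)
          simp [hne]
        show pvPendA ((d.insert (pvPrefix f) (none, none)).insert (pvPrefix f) (some f, none))
          = pvPendB (PySem.Set.add S (pvPrefix f)) I
        rw [hA, hBp, ← hpend, hid]

theorem pvInv_loop (l : List String) (d : PySem.Dict String (Option String × Option String))
    (S : PySem.Set String) (I : PySem.Dict String String) (h : pvInv d S I) :
    pvInv (l.foldl pvStepA d) (l.foldl pvStepB (S, I)).1 (l.foldl pvStepB (S, I)).2 := by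
  induction l generalizing d S I with
  | nil => exact h
  | cons a t ih =>
    simp only [List.foldl_cons]
    have := ih (pvStepA d a) (pvStepB (S, I) a).1 (pvStepB (S, I) a).2 (pvInv_step d S I a h)
    simpa using this

-- A's output loop is the pending list rendered to strings
theorem pv_outA_aux (l : List (String × (Option String × Option String)))
    (acc : List String) :
    (l.map (·.2)).foldl (fun acc p => if p.1 = none then acc ++ [p.2.getD ""] else acc) acc
      = acc ++ (l.filterMap pvG).map (fun q => q.2.getD "") := by
  induction l generalizing acc with
  | nil => simp
  | cons a t ih =>
    simp only [List.map_cons, List.foldl_cons, List.filterMap_cons]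
    rcases ha : a.2.1 with _ | s
    · rw [show pvG a = some (a.1, a.2.2) from by simp [pvG, ha]]
      simpa using ih (acc ++ [a.2.2.getD ""])
    · rw [show pvG a = none from by simp [pvG, ha]]
      simpa using ih acc

theorem pv_outA (d : PySem.Dict String (Option String × Option String)) :
    d.values.foldl (fun acc p => if p.1 = none then acc ++ [p.2.getD ""] else acc) []
      = (pvPendA d).map (fun q => q.2.getD "") := by
  unfold pvPendA
  simpa using pv_outA_aux d.items []

-- ---------- Part II: from the mid-form to B ----------

-- the interleaved fold splits into an independent set fold and dict fold
theorem pv_split_fold (l : List String) (S : PySem.Set String) (I : PySem.Dict String String) :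
    l.foldl pvStepB (S, I)
      = (l.foldl (fun S f => if PySem.Str.endswith f ".import" then S
            else PySem.Set.add S (pvPrefix f)) S,
         l.foldl (fun I f => if PySem.Str.endswith f ".import" then I.insert (pvPrefix f) f
            else I) I) := by
  induction l generalizing S I with
  | nil => rfl
  | cons a t ih =>
    simp only [List.foldl_cons]
    by_cases ha : PySem.Str.endswith a ".import" = true
    · rw [show pvStepB (S, I) a = (S, I.insert (pvPrefix a) a) from by
        simp only [pvStepB]; rw [if_pos ha]]
      rw [ih, if_pos ha, if_pos ha]
    · rw [show pvStepB (S, I) a = (PySem.Set.add S (pvPrefix a), I) from by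
        simp only [pvStepB]; rw [if_neg ha]]
      rw [ih, if_neg ha, if_neg ha]

-- membership in the fold-built source set
theorem pv_mem_source_fold (l : List String) (S : PySem.Set String) (k : String) :
    k ∈ l.foldl (fun S f => if PySem.Str.endswith f ".import" then S
          else PySem.Set.add S (pvPrefix f)) S
      ↔ k ∈ S ∨ ∃ f ∈ l, ¬ PySem.Str.endswith f ".import" = true ∧ pvPrefix f = k := by
  induction l generalizing S with
  | nil => simp
  | cons a t ih =>
    simp only [List.foldl_cons]
    by_cases ha : PySem.Str.endswith a ".import" = true
    · rw [if_pos ha, ih]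
      constructor
      · rintro (h | ⟨f, hf, h1, h2⟩)
        · exact Or.inl h
        · exact Or.inr ⟨f, List.mem_cons_of_mem a hf, h1, h2⟩
      · rintro (h | ⟨f, hf, h1, h2⟩)
        · exact Or.inl h
        · rcases List.mem_cons.mp hf with rfl | hf'
          · exact absurd ha h1
          · exact Or.inr ⟨f, hf', h1, h2⟩
    · rw [if_neg ha, ih]
      constructor
      · rintro (h | ⟨f, hf, h1, h2⟩)
        · rcases (PySem.Set.mem_add _ _ _).mp h with h' | h'
          · exact Or.inl h'
          · exact Or.inr ⟨a, List.mem_cons_self, ha, h'.symm⟩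
        · exact Or.inr ⟨f, List.mem_cons_of_mem a hf, h1, h2⟩
      · rintro (h | ⟨f, hf, h1, h2⟩)
        · exact Or.inl ((PySem.Set.mem_add _ _ _).mpr (Or.inl h))
        · rcases List.mem_cons.mp hf with rfl | hf'
          · exact Or.inl ((PySem.Set.mem_add _ _ _).mpr (Or.inr h2.symm))
          · exact Or.inr ⟨f, hf', h1, h2⟩

-- the fold-built source set and B's comprehension agree on membership
theorem pv_sources_agree (file_names : List String) (k : String) :
    (k ∈ (PySem.List.sorted file_names (fun x => x) false).foldl
        (fun S f => if PySem.Str.endswith f ".import" then S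
          else PySem.Set.add S (pvPrefix f)) PySem.Set.empty)
      ↔ k ∈ pvStemSources file_names := by
  rw [pv_mem_source_fold]
  unfold pvStemSources
  rw [PySem.Set.mem_ofList]
  constructor
  · rintro (h | ⟨f, hf, h1, h2⟩)
    · simp [PySem.Set.empty] at h
    · refine List.mem_map.mpr ⟨f, List.mem_filter.mpr ⟨?_, by
        rw [Bool.not_eq_true] at h1; rw [h1]; rfl⟩, h2⟩
      exact (PySem.List.mem_sorted file_names f (key := fun x => x) (rev := false)).mp hf
  · intro h
    rcases List.mem_map.mp h with ⟨f, hf, h2⟩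
    rcases List.mem_filter.mp hf with ⟨hmem, hprop⟩
    refine Or.inr ⟨f, ?_, by simpa using hprop, h2⟩
    exact (PySem.List.mem_sorted file_names f (key := fun x => x) (rev := false)).mpr hmem

-- the dict fold only touches import files
theorem pv_dict_fold_filter (l : List String) (I : PySem.Dict String String) :
    l.foldl (fun I f => if PySem.Str.endswith f ".import" then I.insert (pvPrefix f) f else I) I
      = (l.filter (fun f => PySem.Str.endswith f ".import")).foldl
          (fun I f => I.insert (pvPrefix f) f) I := by
  induction l generalizing I with
  | nil => rfl
  | cons a t ih =>
    simp only [List.foldl_cons, List.filter_cons]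
    by_cases ha : PySem.Str.endswith a ".import" = true
    · rw [if_pos ha, if_pos ha]
      simp only [List.foldl_cons]
      exact ih _
    · rw [if_neg ha, if_neg ha]
      exact ih I

-- key-preserving map commutes with a key filter
theorem pv_filter_map_keykeep {V : Type} (l : List (V × String)) (g : V × String → V × String)
    (hk : ∀ p, (g p).1 = p.1) (Q : V → Bool) :
    (l.map g).filter (fun p => Q p.1) = (l.filter (fun p => Q p.1)).map g := by
  induction l with
  | nil => rfl
  | cons a t ih =>
    simp only [List.map_cons, List.filter_cons, hk a]
    by_cases hQ : Q a.1 = true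
    · rw [if_pos hQ, if_pos hQ, List.map_cons, ih]
    · rw [if_neg hQ, if_neg hQ, ih]

-- a key-filter of an overwrite-fold's items is the overwrite-fold over the key-filtered input
theorem pv_filter_overwrite (Q : String → Bool) (xs : List String)
    (d d' : PySem.Dict String String)
    (hlink : d'.items = d.items.filter (fun p => Q p.1)) :
    ((xs.filter (fun f => Q (pvPrefix f))).foldl (fun I f => I.insert (pvPrefix f) f) d').items
      = (xs.foldl (fun I f => I.insert (pvPrefix f) f) d).items.filter (fun p => Q p.1) := by
  induction xs generalizing d d' with
  | nil => simpa using hlink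
  | cons a t ih =>
    have hkeys : ∀ k, d'.contains k = (d.contains k && Q k) := by
      intro k
      have h1 : d'.contains k = true ↔ k ∈ d'.keys := PySem.Dict.contains_iff_mem_keys d' k
      have h2 : d.contains k = true ↔ k ∈ d.keys := PySem.Dict.contains_iff_mem_keys d k
      have hk' : k ∈ d'.keys ↔ k ∈ d.keys ∧ Q k = true := by
        simp only [PySem.Dict.keys, hlink, List.mem_map]
        constructor
        · rintro ⟨p, hp, rfl⟩
          rcases List.mem_filter.mp hp with ⟨hp1, hp2⟩
          exact ⟨⟨p, hp1, rfl⟩, hp2⟩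
        · rintro ⟨⟨p, hp1, rfl⟩, hq⟩
          exact ⟨p, List.mem_filter.mpr ⟨hp1, hq⟩, rfl⟩
      by_cases hq : Q k = true
      · rw [hq, Bool.and_true]
        cases hdc : d.contains k with
        | true => rw [h1, hk', hq]; simp [h2.mp hdc]
        | false =>
          rw [← Bool.not_eq_true, h1, hk']
          intro hcon
          rw [← Bool.not_eq_true] at hdc
          exact hdc (h2.mpr hcon.1)
      · rw [Bool.not_eq_true] at hq
        rw [hq, Bool.and_false, ← Bool.not_eq_true, h1, hk']
        intro hcon
        rw [hcon.2] at hq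
        cases hq
    simp only [List.filter_cons, List.foldl_cons]
    have hg : ∀ p : String × String,
        ((fun p => if p.1 == pvPrefix a then (pvPrefix a, a) else p) p).1 = p.1 := by
      intro p
      by_cases hp : (p.1 == pvPrefix a) = true
      · have hkk : p.1 = pvPrefix a := by simpa using hp
        simp [hkk]
      · simp [hp]
    by_cases hQ : Q (pvPrefix a) = true
    · rw [if_pos hQ]
      simp only [List.foldl_cons]
      apply ih
      by_cases hdc : d.contains (pvPrefix a) = true
      · rw [PySem.Dict.items_insert_of_contains d a hdc,
            PySem.Dict.items_insert_of_contains d' a (by rw [hkeys, hdc, hQ]; rfl), hlink]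
        exact (pv_filter_map_keykeep d.items
          (fun p => if p.1 == pvPrefix a then (pvPrefix a, a) else p) hg Q).symm
      · rw [Bool.not_eq_true] at hdc
        rw [PySem.Dict.items_insert_of_not_contains d a hdc,
            PySem.Dict.items_insert_of_not_contains d' a (by rw [hkeys, hdc]; rfl), hlink,
            List.filter_append]
        simp only [List.filter_cons, List.filter_nil]
        rw [if_pos (show Q (pvPrefix a, a).1 = true from hQ)]
    · rw [if_neg hQ]
      refine ih (d.insert (pvPrefix a) a) d' ?_
      rw [Bool.not_eq_true] at hQ
      by_cases hdc : d.contains (pvPrefix a) = true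
      · rw [PySem.Dict.items_insert_of_contains d a hdc,
          pv_filter_map_keykeep d.items
            (fun p => if p.1 == pvPrefix a then (pvPrefix a, a) else p) hg Q]
        have hpt : ∀ p ∈ d.items.filter (fun p => Q p.1),
            (if p.1 == pvPrefix a then (pvPrefix a, a) else p) = id p := by
          intro p hp
          rcases List.mem_filter.mp hp with ⟨_, hq⟩
          have hne : ¬ (p.1 == pvPrefix a) = true := by
            intro hcon
            have hkk : p.1 = pvPrefix a := by simpa using hcon
            rw [hkk, hQ] at hq
            cases hq
          rw [if_neg hne]
          rfl
        rw [List.map_congr_left hpt, List.map_id]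
        exact hlink
      · rw [Bool.not_eq_true] at hdc
        rw [PySem.Dict.items_insert_of_not_contains d a hdc, List.filter_append]
        simp only [List.filter_cons, List.filter_nil]
        rw [if_neg (show ¬ Q (pvPrefix a, a).1 = true from by rw [show Q (pvPrefix a, a).1 = false from hQ]; exact Bool.false_ne_true)]
        rw [List.append_nil]
        exact hlink

-- ---------- Part II b: run-collapsing on the chunked orphan list ----------

-- keep the last element of each run of equal stems
def pvKLR : List String → List String
  | [] => []
  | [x] => [x]
  | x :: y :: t => if pvPrefix x = pvPrefix y then pvKLR (y :: t) else x :: pvKLR (y :: t)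

-- equal entries sit in consecutive runs
def pvChunked : List String → Prop
  | [] => True
  | [_] => True
  | a :: b :: t => (a = b ∨ a ∉ (b :: t)) ∧ pvChunked (b :: t)

-- a fold of inserts never touching key k keeps a leading (k, v) item intact
theorem pv_fold_keeps_head (xs : List String) (d1 d2 : PySem.Dict String String)
    (k : String) (v : String) (hlink : d1.items = (k, v) :: d2.items)
    (hk : k ∉ xs.map pvPrefix) :
    (xs.foldl (fun I f => I.insert (pvPrefix f) f) d1).items
      = (k, v) :: (xs.foldl (fun I f => I.insert (pvPrefix f) f) d2).items := by
  induction xs generalizing d1 d2 with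
  | nil => simpa using hlink
  | cons a t ih =>
    have hka : pvPrefix a ≠ k := by
      intro h
      exact hk (by rw [List.map_cons, ← h]; exact List.mem_cons_self)
    have hkeys : d1.contains (pvPrefix a) = d2.contains (pvPrefix a) := by
      have h1 := PySem.Dict.contains_iff_mem_keys d1 (pvPrefix a)
      have h2 := PySem.Dict.contains_iff_mem_keys d2 (pvPrefix a)
      have hk1 : pvPrefix a ∈ d1.keys ↔ pvPrefix a ∈ d2.keys := by
        simp only [PySem.Dict.keys, hlink, List.map_cons, List.mem_cons]
        constructor
        · rintro (h | h)
          · exact absurd h hka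
          · exact h
        · exact Or.inr
      cases hc : d2.contains (pvPrefix a) with
      | true => rw [h1, hk1]; exact h2.mp hc
      | false =>
        rw [← Bool.not_eq_true, h1, hk1]
        intro hcon
        rw [← Bool.not_eq_true] at hc
        exact hc (h2.mpr hcon)
    simp only [List.foldl_cons]
    apply ih
    · cases hc : d2.contains (pvPrefix a) with
      | true =>
        rw [PySem.Dict.items_insert_of_contains d2 a hc,
            PySem.Dict.items_insert_of_contains d1 a (by rw [hkeys]; exact hc), hlink]
        simp only [List.map_cons]
        congr 1
        rw [if_neg (show ¬ ((k, v).1 == pvPrefix a) = true from by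
          simpa using fun h => hka h.symm)]
      | false =>
        rw [PySem.Dict.items_insert_of_not_contains d2 a hc,
            PySem.Dict.items_insert_of_not_contains d1 a (by rw [hkeys]; exact hc), hlink]
        rfl
    · exact fun h => hk (List.mem_cons_of_mem _ h)

-- items of a single-key dict
theorem pv_items_single (k v : String) :
    (PySem.Dict.empty.insert k v).items = [(k, v)] := by
  rw [PySem.Dict.items_insert_of_not_contains _ _ (PySem.Dict.contains_empty _)]
  rfl

-- the overwrite dict over a chunked list yields the last of each run, in run order
theorem pv_overwrite_klr (O : List String) (hch : pvChunked (O.map pvPrefix)) :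
    (O.foldl (fun I f => I.insert (pvPrefix f) f) PySem.Dict.empty).values = pvKLR O := by
  induction O with
  | nil => rfl
  | cons x xs ih =>
    cases xs with
    | nil =>
      show ((PySem.Dict.empty.insert (pvPrefix x) x)).values = [x]
      rw [PySem.Dict.values, pv_items_single]
      rfl
    | cons y t =>
      rw [List.map_cons, List.map_cons] at hch
      rcases hch with ⟨hhead, hch'⟩
      rw [← List.map_cons] at hch'
      by_cases heq : pvPrefix x = pvPrefix y
      · have hcoll : (x :: y :: t).foldl (fun I f => I.insert (pvPrefix f) f) PySem.Dict.empty
            = (y :: t).foldl (fun I f => I.insert (pvPrefix f) f) PySem.Dict.empty := by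
          simp only [List.foldl_cons]
          rw [heq, PySem.Dict.insert_insert_self]
        rw [hcoll, ih hch']
        show pvKLR (y :: t) = pvKLR (x :: y :: t)
        rw [show pvKLR (x :: y :: t) = if pvPrefix x = pvPrefix y then pvKLR (y :: t)
            else x :: pvKLR (y :: t) from rfl, if_pos heq]
      · have hnot : pvPrefix x ∉ (y :: t).map pvPrefix := by
          rcases hhead with h | h
          · exact absurd h heq
          · rw [List.map_cons]; exact h
        have hstep : ((x :: y :: t).foldl (fun I f => I.insert (pvPrefix f) f)
              PySem.Dict.empty).items
            = (pvPrefix x, x) ::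
              ((y :: t).foldl (fun I f => I.insert (pvPrefix f) f) PySem.Dict.empty).items := by
          simp only [List.foldl_cons]
          exact pv_fold_keeps_head (y :: t) _ _ _ _ (pv_items_single (pvPrefix x) x) hnot
        rw [PySem.Dict.values, hstep, List.map_cons]
        rw [← PySem.Dict.values, ih hch']
        show x :: pvKLR (y :: t) = pvKLR (x :: y :: t)
        rw [show pvKLR (x :: y :: t) = if pvPrefix x = pvPrefix y then pvKLR (y :: t)
            else x :: pvKLR (y :: t) from rfl, if_neg heq]

-- B's backward pass as plain recursion
def pvDedupSkip (l : List String) (seen : PySem.Set String) : List String :=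
  match l with
  | [] => []
  | f :: t =>
    if PySem.Set.contains seen (pvPrefix f) then pvDedupSkip t seen
    else f :: pvDedupSkip t (PySem.Set.add seen (pvPrefix f))

theorem pv_fold_keep_eq_dedupSkip (l : List String) (acc : List String) (seen : PySem.Set String) :
    (l.foldl pvStepKeep (acc, seen)).1 = acc ++ pvDedupSkip l seen := by
  induction l generalizing acc seen with
  | nil => simp [pvDedupSkip]
  | cons a t ih =>
    simp only [List.foldl_cons, pvDedupSkip]
    by_cases hc : PySem.Set.contains seen (pvPrefix a) = true
    · rw [show pvStepKeep (acc, seen) a = (acc, seen) from by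
        simp only [pvStepKeep]; rw [if_pos hc], if_pos hc]
      exact ih acc seen
    · rw [show pvStepKeep (acc, seen) a = (acc ++ [a], PySem.Set.add seen (pvPrefix a)) from by
        simp only [pvStepKeep]; rw [if_neg hc], if_neg hc]
      rw [ih]
      simp

theorem pv_contains_add (S : PySem.Set String) (a k : String) :
    PySem.Set.contains (PySem.Set.add S a) k = (PySem.Set.contains S k || decide (k = a)) := by
  by_cases hm : k ∈ PySem.Set.add S a
  · rw [(pv_contains_iff _ _).mpr hm]
    rcases (PySem.Set.mem_add _ _ _).mp hm with h | h
    · rw [(pv_contains_iff _ _).mpr h]; rfl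
    · simp [h]
  · rw [(pv_contains_false_iff _ _).mpr hm]
    rw [PySem.Set.mem_add] at hm
    push_neg at hm
    rw [(pv_contains_false_iff _ _).mpr hm.1]
    simp [hm.2]

theorem pv_dedupSkip_append (l : List String) (S : PySem.Set String) (x : String) :
    pvDedupSkip (l ++ [x]) S
      = pvDedupSkip l S ++
        (if PySem.Set.contains S (pvPrefix x) || decide (pvPrefix x ∈ l.map pvPrefix)
         then ([] : List String) else [x]) := by
  induction l generalizing S with
  | nil => simp [pvDedupSkip]
  | cons a t ih =>
    simp only [List.cons_append, pvDedupSkip]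
    by_cases hc : PySem.Set.contains S (pvPrefix a) = true
    · rw [if_pos hc, if_pos hc, ih]
      congr 1
      by_cases hxa : pvPrefix x = pvPrefix a
      · have hcx : PySem.Set.contains S (pvPrefix x) = true := by rw [hxa]; exact hc
        rw [hcx]
        simp
      · simp only [List.map_cons, List.mem_cons]
        simp [hxa]
    · rw [if_neg hc, if_neg hc, ih, List.cons_append]
      congr 2
      rw [pv_contains_add]
      simp only [List.map_cons, List.mem_cons]
      by_cases hxa : pvPrefix x = pvPrefix a
      · simp [hxa]
      · simp [hxa]

theorem pv_dedupSkip_klr (O : List String) (hch : pvChunked (O.map pvPrefix)) :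
    (pvDedupSkip O.reverse PySem.Set.empty).reverse = pvKLR O := by
  induction O with
  | nil => rfl
  | cons x xs ih =>
    cases xs with
    | nil =>
      show (pvDedupSkip [x] PySem.Set.empty).reverse = pvKLR [x]
      have h0 : PySem.Set.contains PySem.Set.empty (pvPrefix x) = false :=
        (pv_contains_false_iff _ _).mpr (by simp [PySem.Set.empty])
      rw [show pvDedupSkip [x] PySem.Set.empty = [x] from by simp [pvDedupSkip, h0]]
      rfl
    | cons y t =>
      rw [List.map_cons, List.map_cons] at hch
      rcases hch with ⟨hhead, hch'⟩
      rw [← List.map_cons] at hch'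
      have hrev : (x :: y :: t).reverse = (y :: t).reverse ++ [x] := by simp
      rw [hrev, pv_dedupSkip_append]
      have hempty : PySem.Set.contains PySem.Set.empty (pvPrefix x) = false :=
        (pv_contains_false_iff _ _).mpr (by simp [PySem.Set.empty])
      have hmemrev : (pvPrefix x ∈ (y :: t).reverse.map pvPrefix)
          ↔ (pvPrefix x ∈ (y :: t).map pvPrefix) := by
        rw [List.map_reverse, List.mem_reverse]
      by_cases heq : pvPrefix x = pvPrefix y
      · have hmem : pvPrefix x ∈ (y :: t).reverse.map pvPrefix := by
          rw [hmemrev, List.map_cons, heq]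
          exact List.mem_cons_self
        rw [hempty, if_pos (by rw [decide_eq_true hmem]; rfl), List.append_nil, ih hch']
        show pvKLR (y :: t) = pvKLR (x :: y :: t)
        rw [show pvKLR (x :: y :: t) = if pvPrefix x = pvPrefix y then pvKLR (y :: t)
            else x :: pvKLR (y :: t) from rfl, if_pos heq]
      · have hnot : pvPrefix x ∉ (y :: t).map pvPrefix := by
          rcases hhead with h | h
          · exact absurd h heq
          · rw [List.map_cons]; exact h
        have hmem : ¬ pvPrefix x ∈ (y :: t).reverse.map pvPrefix := fun h =>
          hnot (hmemrev.mp h)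
        rw [hempty, if_neg (by rw [decide_eq_false hmem]; exact fun h => by cases h)]
        rw [List.reverse_append, List.reverse_singleton, List.singleton_append, ih hch']
        show x :: pvKLR (y :: t) = pvKLR (x :: y :: t)
        rw [show pvKLR (x :: y :: t) = if pvPrefix x = pvPrefix y then pvKLR (y :: t)
            else x :: pvKLR (y :: t) from rfl, if_neg heq]

-- ---------- Part II c: sortedness makes the orphan list chunked ----------

-- two lists with an unequal position inside both compare like their heads do, whatever follows
theorem pv_lex_step (a b : List Char) (hab : ¬ a <+: b) (hba : ¬ b <+: a) (p q : List Char) :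
    (a ++ p) < (b ++ q) ↔ a < b := by
  induction a generalizing b with
  | nil => exact absurd (List.nil_prefix) hab
  | cons c a' ih =>
    cases b with
    | nil => exact absurd (List.nil_prefix) hba
    | cons d b' =>
      by_cases hcd : c = d
      · subst hcd
        have h1 : ¬ a' <+: b' := fun h => hab (List.cons_prefix_cons.mpr ⟨rfl, h⟩)
        have h2 : ¬ b' <+: a' := fun h => hba (List.cons_prefix_cons.mpr ⟨rfl, h⟩)
        simp only [List.cons_append, List.cons_lt_cons_iff]
        rw [ih b' h1 h2]
      · simp only [List.cons_append, List.cons_lt_cons_iff]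
        constructor
        · rintro (h | ⟨h, _⟩)
          · exact Or.inl h
          · exact absurd h hcd
        · rintro (h | ⟨h, _⟩)
          · exact Or.inl h
          · exact absurd h hcd

-- dot-terminated dot-free stems are mutually prefix-free
theorem pv_nopref (s t : List Char) (hs : '.' ∉ s) (ht : '.' ∉ t) (hne : s ≠ t) :
    ¬ (s ++ ['.']) <+: (t ++ ['.']) := by
  intro h
  rcases h with ⟨r, hr⟩
  rcases Nat.lt_trichotomy s.length t.length with hlt | heq | hgt
  · have hdot : '.' ∈ t := by
      have hget : (t ++ ['.'])[s.length]? = some '.' := by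
        rw [← hr, show s ++ ['.'] ++ r = s ++ '.' :: r from by simp]
        rw [List.getElem?_append_right (le_refl _)]
        simp
      rw [List.getElem?_append_left hlt] at hget
      exact List.mem_of_getElem? hget
    exact ht hdot
  · have hlen : (s ++ ['.'] ++ r).length = (t ++ ['.']).length := by rw [hr]
    simp only [List.length_append, List.length_cons, List.length_nil] at hlen
    have hr0 : r = [] := List.eq_nil_of_length_eq_zero (by omega)
    subst hr0
    simp only [List.append_nil] at hr
    exact hne (List.append_inj_left' hr (by simp))
  · have hlen : (s ++ ['.'] ++ r).length = (t ++ ['.']).length := by rw [hr]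
    simp only [List.length_append, List.length_cons, List.length_nil] at hlen
    omega

-- split(".")[0] is the chars before the first dot (head lemmas for PySem.Chars.splitOn.go)
theorem pv_go_acc (fuel : Nat) (l cur : List Char) (acc : List (List Char)) :
    PySem.Chars.splitOn.go ['.'] fuel l cur acc
      = acc.reverse ++ PySem.Chars.splitOn.go ['.'] fuel l cur [] := by
  induction fuel generalizing l cur acc with
  | zero => simp [PySem.Chars.splitOn.go]
  | succ fuel ih =>
    cases l with
    | nil => simp [PySem.Chars.splitOn.go]
    | cons c rest =>
      simp only [PySem.Chars.splitOn.go]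
      by_cases hp : (['.'].isPrefixOf (c :: rest)) = true
      · rw [if_pos hp, if_pos hp, ih _ _ (cur.reverse :: acc), ih _ _ [cur.reverse]]
        simp
      · rw [if_neg hp, if_neg hp, ih]

theorem pv_go_first (fuel : Nat) (l cur : List Char) (hfuel : l.length < fuel) :
    ∃ tl, PySem.Chars.splitOn.go ['.'] fuel l cur []
      = (cur.reverse ++ l.takeWhile (fun c => !(c == '.'))) :: tl := by
  induction fuel generalizing l cur with
  | zero => omega
  | succ fuel ih =>
    cases l with
    | nil =>
      refine ⟨[], ?_⟩
      simp [PySem.Chars.splitOn.go]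
    | cons c rest =>
      simp only [PySem.Chars.splitOn.go]
      by_cases hp : (['.'].isPrefixOf (c :: rest)) = true
      · have hc : c = '.' := by
          have := (List.isPrefixOf_iff_prefix).mp hp
          rcases this with ⟨r, hr⟩
          simpa using congrArg (·.head?) hr.symm
        rw [if_pos hp, pv_go_acc]
        refine ⟨PySem.Chars.splitOn.go ['.'] fuel (List.drop 1 (c :: rest)) [] [], ?_⟩
        simp only [List.reverse_cons, List.reverse_nil, List.nil_append, List.singleton_append]
        rw [List.takeWhile_cons, hc]
        simp
      · rw [if_neg hp]
        have hc : ¬ c = '.' := by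
          intro hcon
          exact hp (by rw [hcon]; simp [List.isPrefixOf])
        have hlen : rest.length < fuel := by
          simpa using Nat.lt_of_succ_lt_succ hfuel
        rcases ih rest (c :: cur) hlen with ⟨tl, htl⟩
        refine ⟨tl, ?_⟩
        rw [htl, List.takeWhile_cons]
        simp [hc]

theorem pv_prefix_toList (f : String) :
    (pvPrefix f).toList = f.toList.takeWhile (fun c => !(c == '.')) := by
  unfold pvPrefix
  have hlist : (".".toList) = ['.'] := rfl
  have hsplit : Option.map (fun x => List.map String.toList x) (PySem.Str.split? f ".")
      = PySem.Chars.split? f.toList ['.'] := by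
    rw [← hlist]
    exact PySem.Str.split?_map f "."
  have hchars : PySem.Chars.split? f.toList ['.']
      = some (PySem.Chars.splitOn f.toList ['.']) := by
    simp [PySem.Chars.split?]
  rcases hval : PySem.Str.split? f "." with _ | parts
  · rw [hval] at hsplit
    rw [hchars] at hsplit
    cases hsplit
  · rw [hval] at hsplit
    rw [hchars] at hsplit
    simp only [Option.map_some, Option.some.injEq] at hsplit
    have hgo : PySem.Chars.splitOn f.toList ['.']
        = PySem.Chars.splitOn.go ['.'] (f.toList.length + 1) f.toList [] [] := rfl
    rcases pv_go_first (f.toList.length + 1) f.toList [] (by omega) with ⟨tl, htl⟩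
    rw [hgo, htl] at hsplit
    rcases parts with _ | ⟨p0, pt⟩
    · cases hsplit
    · simp only [List.map_cons, List.cons.injEq] at hsplit
      simp only [Option.getD_some, List.headD_cons]
      rw [hsplit.1]
      simp

-- a list containing '.' splits at its first '.'
theorem pv_take_drop (cs : List Char) (h : '.' ∈ cs) :
    cs = cs.takeWhile (fun c => !(c == '.')) ++ '.' :: (cs.dropWhile (fun c => !(c == '.'))).tail := by
  induction cs with
  | nil => cases h
  | cons c rest ih =>
    by_cases hc : c = '.'
    · subst hc
      simp [List.takeWhile_cons, List.dropWhile_cons]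
    · have h' : '.' ∈ rest := by
        rcases List.mem_cons.mp h with h0 | h0
        · exact absurd h0.symm hc
        · exact h0
      have hp : (!(c == '.')) = true := by simp [hc]
      rw [List.takeWhile_cons, List.dropWhile_cons, if_pos hp, if_pos hp, List.cons_append]
      exact congrArg (c :: ·) (ih h')

-- every '.import' file decomposes as stem ++ '.' ++ rest with a dot-free stem
theorem pv_import_decomp (f : String) (h : PySem.Str.endswith f ".import" = true) :
    ∃ rest, f.toList = (pvPrefix f).toList ++ '.' :: rest ∧ '.' ∉ (pvPrefix f).toList := by
  have hdot : '.' ∈ f.toList := by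
    have hsuf : ".import".toList <:+ f.toList := by
      have := (PySem.Chars.endswith_iff f.toList ".import".toList).mp (by
        rw [← PySem.Str.endswith_eq]; exact h)
      exact this
    rcases hsuf with ⟨r, hr⟩
    rw [← hr]
    simp
  refine ⟨(f.toList.dropWhile (fun c => !(c == '.'))).tail, ?_, ?_⟩
  · rw [pv_prefix_toList]
    exact pv_take_drop f.toList hdot
  · rw [pv_prefix_toList]
    intro hmem
    have := List.mem_takeWhile_imp hmem
    simp at this

-- a sorted list of '.import' files has chunked stems
theorem pv_sorted_chunked (O : List String)
    (hsort : O.Pairwise (fun a b => a ≤ b))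
    (himp : ∀ f ∈ O, PySem.Str.endswith f ".import" = true) :
    pvChunked (O.map pvPrefix) := by
  induction O with
  | nil => trivial
  | cons x xs ih =>
    cases xs with
    | nil => trivial
    | cons y t =>
      rcases List.pairwise_cons.mp hsort with ⟨hx, hsort'⟩
      rw [List.map_cons, List.map_cons]
      refine ⟨?_, by
        have := ih hsort' (fun f hf => himp f (List.mem_cons_of_mem x hf))
        rw [List.map_cons] at this
        exact this⟩
      by_cases heq : pvPrefix x = pvPrefix y
      · exact Or.inl heq
      · refine Or.inr ?_
        rw [← List.map_cons]
        intro hmem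
        obtain ⟨z, hz, hzx⟩ := List.mem_map.mp hmem
        rcases List.mem_cons.mp hz with rfl | hzt
        · exact heq hzx.symm
        · -- x ≤ y ≤ z, stem x = stem z ≠ stem y: contradiction via pv_lex_step
          have hxy : x ≤ y := hx y List.mem_cons_self
          have hyz : y ≤ z := by
            rcases List.pairwise_cons.mp hsort' with ⟨hy, _⟩
            exact hy z hzt
          rcases pv_import_decomp x (himp x List.mem_cons_self) with ⟨px, hex, hdx⟩
          rcases pv_import_decomp y (himp y (List.mem_cons_of_mem x List.mem_cons_self))
            with ⟨py, hey, hdy⟩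
          rcases pv_import_decomp z (himp z (List.mem_cons_of_mem x
            (List.mem_cons_of_mem y hzt))) with ⟨pz, hez, hdz⟩
          have hxz : (pvPrefix x).toList = (pvPrefix z).toList := by rw [hzx]
          have hxyL : (pvPrefix x).toList ≠ (pvPrefix y).toList := by
            intro hcon
            exact heq (String.toList_inj.mp hcon)
          have hnp1 := pv_nopref _ _ hdx hdy hxyL
          have hnp2 := pv_nopref _ _ hdy hdx (Ne.symm hxyL)
          have hxyne : x ≠ y := fun hcon => heq (by rw [hcon])
          have hxylt : x.toList < y.toList := by
            rcases lt_or_eq_of_le (String.le_iff_toList_le.mp hxy) with h' | h'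
            · exact h'
            · exact absurd (String.toList_inj.mp h') hxyne
          have hyzne : y ≠ z := fun hcon => heq (by rw [hcon]; exact hzx.symm)
          have hyzlt : y.toList < z.toList := by
            rcases lt_or_eq_of_le (String.le_iff_toList_le.mp hyz) with h' | h'
            · exact h'
            · exact absurd (String.toList_inj.mp h') hyzne
          rw [hex, hey,
            show (pvPrefix x).toList ++ '.' :: px = ((pvPrefix x).toList ++ ['.']) ++ px from
              by simp,
            show (pvPrefix y).toList ++ '.' :: py = ((pvPrefix y).toList ++ ['.']) ++ py from
              by simp, pv_lex_step _ _ hnp1 hnp2] at hxylt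
          rw [hey, hez, ← hxz,
            show (pvPrefix y).toList ++ '.' :: py = ((pvPrefix y).toList ++ ['.']) ++ py from
              by simp,
            show (pvPrefix x).toList ++ '.' :: pz = ((pvPrefix x).toList ++ ['.']) ++ pz from
              by simp, pv_lex_step _ _ hnp2 hnp1] at hyzlt
          exact absurd hyzlt (lt_asymm hxylt)

-- sorting commutes with a filter
theorem pv_sorted_filter (xs : List String) (q : String → Bool) :
    PySem.List.sorted (xs.filter q) (fun x => x) false
      = (PySem.List.sorted xs (fun x => x) false).filter q := by
  apply PySem.List.sorted_id_eq_of_perm_of_pairwise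
  · exact ((PySem.List.sorted_perm xs (fun x => x) (rev := false))).filter q
  · exact List.Pairwise.sublist List.filter_sublist (PySem.List.sorted_pairwise xs (fun x => x))

theorem pv_pendB_render (S : PySem.Set String) (l : List (String × String)) :
    (l.filterMap (pvH S)).map (fun q => q.2.getD "")
      = (l.filter (fun p => !(PySem.Set.contains S p.1))).map (·.2) := by
  induction l with
  | nil => rfl
  | cons a t ih =>
    cases ha : PySem.Set.contains S a.1 with
    | true =>
      rw [List.filterMap_cons_none (show pvH S a = none from by unfold pvH; rw [if_pos ha]),
        List.filter_cons, show (!PySem.Set.contains S a.1) = false from by rw [ha]; rfl,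
        if_neg Bool.false_ne_true]
      exact ih
    | false =>
      rw [List.filterMap_cons_some (show pvH S a = some (a.1, some a.2) from by
          unfold pvH; rw [if_neg (by rw [ha]; exact Bool.false_ne_true)]),
        List.filter_cons, show (!PySem.Set.contains S a.1) = true from by rw [ha]; rfl,
        if_pos rfl, List.map_cons, List.map_cons]
      exact congrArg (List.cons a.2) ih

theorem pv_mid_eq_alt (fn : List String) :
    (pvPendB ((PySem.List.sorted fn (fun x => x) false).foldl pvStepB
        (PySem.Set.empty, PySem.Dict.empty)).1
      ((PySem.List.sorted fn (fun x => x) false).foldl pvStepB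
        (PySem.Set.empty, PySem.Dict.empty)).2).map (fun q => q.2.getD "")
      = find_redundant_import_files_in_folder_py_alt fn := by
  have hsplit := pv_split_fold (PySem.List.sorted fn (fun x => x) false)
    PySem.Set.empty PySem.Dict.empty
  set L := PySem.List.sorted fn (fun x => x) false with hL
  set S := (L.foldl pvStepB (PySem.Set.empty, PySem.Dict.empty)).1 with hS
  set I := (L.foldl pvStepB (PySem.Set.empty, PySem.Dict.empty)).2 with hI
  have hSval : S = L.foldl (fun S f => if PySem.Str.endswith f ".import" then S
      else PySem.Set.add S (pvPrefix f)) PySem.Set.empty := by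
    rw [hS, hsplit]
  have hIval : I = (L.filter (fun f => PySem.Str.endswith f ".import")).foldl
      (fun I f => I.insert (pvPrefix f) f) PySem.Dict.empty := by
    rw [hI, hsplit, pv_dict_fold_filter]
  -- identify B's source set with S on contains
  have hcont : ∀ k, PySem.Set.contains (pvStemSources fn) k = PySem.Set.contains S k := by
    intro k
    by_cases hm : k ∈ S
    · rw [(pv_contains_iff _ _).mpr hm, (pv_contains_iff _ _).mpr
        ((pv_sources_agree fn k).mp (by rw [← hSval]; exact hm))]
    · rw [(pv_contains_false_iff _ _).mpr hm, (pv_contains_false_iff _ _).mpr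
        (fun hcon => hm (by rw [hSval]; exact (pv_sources_agree fn k).mpr hcon))]
  -- B's orphan list equals the S-filtered sorted list
  have horph : PySem.List.sorted
      (fn.filter (fun f =>
        PySem.Str.endswith f ".import" && !(PySem.Set.contains (pvStemSources fn) (pvPrefix f))))
      (fun x => x) false
      = (L.filter (fun f => PySem.Str.endswith f ".import")).filter
          (fun f => !(PySem.Set.contains S (pvPrefix f))) := by
    rw [pv_sorted_filter, ← hL, List.filter_filter]
    apply List.filter_congr
    intro f _
    rw [hcont (pvPrefix f), Bool.and_comm]
  set O := (L.filter (fun f => PySem.Str.endswith f ".import")).filter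
    (fun f => !(PySem.Set.contains S (pvPrefix f))) with hO
  -- the orphan list is sorted and all-imports, hence chunked
  have hOsub : O.Sublist L := List.Sublist.trans List.filter_sublist List.filter_sublist
  have hch : pvChunked (O.map pvPrefix) := by
    apply pv_sorted_chunked
    · exact List.Pairwise.sublist hOsub (PySem.List.sorted_pairwise fn (fun x => x))
    · intro f hf
      have h1 := (List.mem_filter.mp hf).1
      exact (List.mem_filter.mp h1).2
  -- LHS: render, move the filter into the fold, read off values, collapse runs
  have hlhs : (pvPendB S I).map (fun q => q.2.getD "") = pvKLR O := by
    unfold pvPendB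
    rw [pv_pendB_render, hIval]
    rw [show (((L.filter (fun f => PySem.Str.endswith f ".import")).foldl
        (fun I f => I.insert (pvPrefix f) f) PySem.Dict.empty).items.filter
          (fun p => !(PySem.Set.contains S p.1))).map (·.2)
      = (((L.filter (fun f => PySem.Str.endswith f ".import")).filter
            (fun f => !(PySem.Set.contains S (pvPrefix f)))).foldl
          (fun I f => I.insert (pvPrefix f) f) PySem.Dict.empty).items.map (·.2) from by
        rw [pv_filter_overwrite (fun k => !(PySem.Set.contains S k))
          (L.filter (fun f => PySem.Str.endswith f ".import"))
          PySem.Dict.empty PySem.Dict.empty rfl]]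
    rw [← hO]
    rw [show ((O.foldl (fun I f => I.insert (pvPrefix f) f) PySem.Dict.empty).items.map (·.2))
        = (O.foldl (fun I f => I.insert (pvPrefix f) f) PySem.Dict.empty).values from rfl]
    exact pv_overwrite_klr O hch
  -- RHS: B's backward pass also collapses runs
  have hrhs : find_redundant_import_files_in_folder_py_alt fn = pvKLR O := by
    show (((PySem.List.sorted
        (fn.filter (fun f => PySem.Str.endswith f ".import"
          && !(PySem.Set.contains (pvStemSources fn) (pvPrefix f)))) (fun x => x)
        false).reverse.foldl pvStepKeep ([], PySem.Set.empty)).1).reverse = pvKLR O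
    rw [show (PySem.List.sorted
        (fn.filter (fun f => PySem.Str.endswith f ".import"
          && !(PySem.Set.contains (pvStemSources fn) (pvPrefix f)))) (fun x => x) false)
      = O from horph]
    rw [pv_fold_keep_eq_dedupSkip, List.nil_append]
    exact pv_dedupSkip_klr O hch
  rw [hlhs, hrhs]

-- ===== VERDICT (by name: the statement is the Claim_ definition above) =====
theorem find_redundant_import_files_in_folder_py_spec : Claim_equal_find_redundant_import_files_in_folder_py := by
  intro file_names _
  unfold Spec_find_redundant_import_files_in_folder_py
  have h0 : pvInv PySem.Dict.empty PySem.Set.empty PySem.Dict.empty := by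
    refine ⟨by simp [PySem.Dict.keys, PySem.Dict.empty], by simp [PySem.Dict.keys, PySem.Dict.empty], ?_, rfl⟩
    intro k
    simp [PySem.Dict.get?_empty, PySem.Set.empty]
  have hinv := pvInv_loop (PySem.List.sorted file_names (fun x => x) false)
    PySem.Dict.empty PySem.Set.empty PySem.Dict.empty h0
  rcases hinv with ⟨-, -, -, hpend⟩
  have hA : find_redundant_import_files_in_folder_py file_names
      = (pvPendA ((PySem.List.sorted file_names (fun x => x) false).foldl pvStepA
          PySem.Dict.empty)).map (fun q => q.2.getD "") := by
    show (((PySem.List.sorted file_names (fun x => x) false).foldl pvStepA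
        PySem.Dict.empty).values.foldl
        (fun acc p => if p.1 = none then acc ++ [p.2.getD ""] else acc) []) = _
    exact pv_outA _
  rw [hA, hpend, pv_mid_eq_alt]
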